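-- pv_equiv track=rewrite | github.com/johnmarriott/advent-of-code | year2025/day06/2.py | operator_line_to_operators_and_widths
-- ===== SOURCE A (Python) =====
-- def operator_line_to_operators_and_widths(operator_line: str) -> tuple[list[str], list[int]]:
--     operators = []
--     input_widths = []
--
--     # The line starts with the first operator: trim it off the front of the string
--     # and count how many spaces there are until the next operator: this is the width
--     # of this column.
--     #
--     # If it's the last column, there are only spaces remaining in the string, and
--     # that width + 1 is the width of the last column.
--     while len(operator_line) > 0:
--         operators.append(operator_line[0])
--         operator_line = operator_line[1:]
--
--         if operator_line.isspace():
--             # this was the last operator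
--             input_widths.append(len(operator_line) + 1)
--             break
--
--         # count spaces until the next operator
--         current_width = 0
--         while len(operator_line) > 0 and operator_line[0] == " ":
--             current_width += 1
--             operator_line = operator_line[1:]
--
--         input_widths.append(current_width)
--
--     return operators, input_widths
-- ===== SOURCE B (Python) =====
-- def operator_line_to_operators_and_widths(operator_line: str) -> tuple[list[str], list[int]]:
--     # Single left-to-right pass over the string with index pointers: no slicing/copying.
--     n = len(operator_line)
--     # ws = start of the maximal all-whitespace suffix of the line
--     ws = n
--     while ws > 0 and operator_line[ws - 1].isspace():
--         ws -= 1
--     operators = []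
--     input_widths = []
--     i = 0
--     while i < n:
--         operators.append(operator_line[i])
--         i += 1
--         if ws <= i < n:
--             # the rest of the line is whitespace: last column
--             input_widths.append(n - i + 1)
--             break
--         j = i
--         while j < n and operator_line[j] == " ":
--             j += 1
--         input_widths.append(j - i)
--         i = j
--     return operators, input_widths
-- ===== Notes on version B (the rewrite author's own statement) =====
-- stated objective: faster
-- what changed: B replaces A's repeated string slicing (operator_line = operator_line[1:] and per-char isspace() rescans) with a single left-to-right pass using index pointers over the unchanged string, plus one precomputed whitespace-suffix boundary that answers A's rest.isspace() test in O(1).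
import Mathlib
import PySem

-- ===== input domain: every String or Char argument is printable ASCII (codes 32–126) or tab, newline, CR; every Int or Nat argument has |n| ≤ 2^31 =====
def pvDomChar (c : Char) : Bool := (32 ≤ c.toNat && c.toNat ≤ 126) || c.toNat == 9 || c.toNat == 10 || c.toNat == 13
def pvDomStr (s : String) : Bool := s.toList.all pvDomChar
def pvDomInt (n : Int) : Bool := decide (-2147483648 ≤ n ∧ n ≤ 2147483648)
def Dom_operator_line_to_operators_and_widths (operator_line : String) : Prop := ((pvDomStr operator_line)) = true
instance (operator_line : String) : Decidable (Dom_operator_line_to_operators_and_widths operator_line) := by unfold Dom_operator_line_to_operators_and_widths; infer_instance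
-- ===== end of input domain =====

-- B replaces A's repeated string slicing by a single left-to-right pass with index
-- pointers (plus one precomputed whitespace-suffix boundary): objective faster, O(n) vs O(n^2).

-- ===== PORT A =====
-- inner while loop of A: count leading spaces and drop them
def pvCountSpacesA : List Char → Nat × List Char
  | [] => (0, [])
  | c :: rest =>
    if c = ' ' then
      let p := pvCountSpacesA rest
      (p.1 + 1, p.2)
    else (0, c :: rest)

-- used by pvLoopA's termination proof
theorem pvCountSpacesA_len (l : List Char) : (pvCountSpacesA l).2.length ≤ l.length := by
  induction l with
  | nil => simp [pvCountSpacesA]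
  | cons c rest ih =>
    by_cases h : c = ' ' <;> simp [pvCountSpacesA, h]
    omega

-- outer while loop of A
def pvLoopA : List Char → List String × List Int
  | [] => ([], [])
  | c :: rest =>
    if PySem.Chars.strIsspace rest then
      ([String.ofList [c]], [((rest.length : Int) + 1)])
    else
      let p := pvCountSpacesA rest
      let q := pvLoopA p.2
      (String.ofList [c] :: q.1, ((p.1 : Int)) :: q.2)
termination_by l => l.length
decreasing_by
  have := pvCountSpacesA_len rest
  simp_all

def operator_line_to_operators_and_widths (operator_line : String) : List String × List Int :=
  pvLoopA operator_line.toList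

-- ===== PORT B =====
-- 'while ws > 0 and operator_line[ws-1].isspace(): ws -= 1'
def pvWsLoop (l : List Char) : Nat → Nat
  | 0 => 0
  | w + 1 => if PySem.Chars.isspace (l.getD w ' ') then pvWsLoop l w else w + 1

-- 'while j < n and operator_line[j] == " ": j += 1'
def pvScan (l : List Char) (n j : Nat) : Nat :=
  if j < n ∧ l.getD j ' ' = ' ' then pvScan l n (j + 1) else j
termination_by n - j
decreasing_by omega

-- used by pvLoopB's termination proof
theorem pvScan_ge (l : List Char) (n j : Nat) : j ≤ pvScan l n j := by
  fun_induction pvScan l n j with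
  | case1 j h ih => omega
  | case2 j h => omega

-- main while loop of B
def pvLoopB (l : List Char) (n ws i : Nat) : List String × List Int :=
  if hlt : i < n then
    let op := String.ofList [l.getD i ' ']
    if ws ≤ i + 1 ∧ i + 1 < n then
      ([op], [(n : Int) - ((i + 1 : Nat) : Int) + 1])
    else
      let j := pvScan l n (i + 1)
      let q := pvLoopB l n ws j
      (op :: q.1, ((j : Int) - ((i + 1 : Nat) : Int)) :: q.2)
  else ([], [])
termination_by n - i
decreasing_by
  have := pvScan_ge l n (i + 1)
  omega

def operator_line_to_operators_and_widths_alt (operator_line : String) : List String × List Int :=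
  let l := operator_line.toList
  let n := l.length
  let ws := pvWsLoop l n
  pvLoopB l n ws 0

-- ===== PRECONDITION & SPEC =====
def Spec_operator_line_to_operators_and_widths (operator_line : String) (out : List String × List Int) : Prop := out = operator_line_to_operators_and_widths_alt operator_line
instance (operator_line : String) (out : List String × List Int) : Decidable (Spec_operator_line_to_operators_and_widths operator_line out) := by unfold Spec_operator_line_to_operators_and_widths; infer_instance

-- ===== CLAIM (what is proved, stated in full; the proofs are below) =====
def Claim_equal_operator_line_to_operators_and_widths : Prop := ∀ (operator_line : String), Dom_operator_line_to_operators_and_widths operator_line → Spec_operator_line_to_operators_and_widths operator_line (operator_line_to_operators_and_widths operator_line)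

-- ===== LEMMAS AND PROOFS =====

theorem pvWsLoop_le (l : List Char) (w : Nat) : pvWsLoop l w ≤ w := by
  induction w with
  | zero => simp [pvWsLoop]
  | succ w ih =>
    simp only [pvWsLoop]
    split <;> omega

theorem pvWsLoop_all (l : List Char) (w : Nat) :
    ∀ k, pvWsLoop l w ≤ k → k < w → PySem.Chars.isspace (l.getD k ' ') = true := by
  induction w with
  | zero => omega
  | succ w ih =>
    intro k h1 h2
    simp only [pvWsLoop] at h1
    split at h1
    · rcases Nat.lt_succ_iff_lt_or_eq.mp h2 with h | h
      · exact ih k h1 h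
      · subst h; assumption
    · omega

theorem pvWsLoop_stop (l : List Char) (w : Nat) :
    pvWsLoop l w = 0 ∨ PySem.Chars.isspace (l.getD (pvWsLoop l w - 1) ' ') = false := by
  induction w with
  | zero => left; rfl
  | succ w ih =>
    simp only [pvWsLoop]
    by_cases h : PySem.Chars.isspace (l.getD w ' ') = true
    · rw [if_pos h]; exact ih
    · rw [if_neg h]; right; simpa using h

-- A's `operator_line.isspace()` on the suffix from i equals B's index test against ws
theorem isspace_drop_iff (l : List Char) (i : Nat) (hi : i ≤ l.length) :
    PySem.Chars.strIsspace (l.drop i) = true ↔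
      (pvWsLoop l l.length ≤ i ∧ i < l.length) := by
  constructor
  · intro h
    simp only [PySem.Chars.strIsspace, Bool.and_eq_true, List.all_eq_true] at h
    obtain ⟨hne, hall⟩ := h
    have hlt : i < l.length := by
      by_contra hc
      have : l.drop i = [] := List.drop_eq_nil_of_le (by omega)
      simp [this] at hne
    refine ⟨?_, hlt⟩
    by_contra hc
    push Not at hc
    set ws := pvWsLoop l l.length with hws
    have hwle : ws ≤ l.length := pvWsLoop_le l l.length
    have hpos : 0 < ws := by omega
    have hmem : l[ws - 1]'(by omega) ∈ l.drop i := by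
      rw [List.mem_iff_getElem]
      exact ⟨ws - 1 - i, by simp; omega, by rw [List.getElem_drop]; congr 1; omega⟩
    have := hall _ hmem
    have hgd : l.getD (ws - 1) ' ' = l[ws - 1]'(by omega) := List.getD_eq_getElem l ' ' (by omega)
    rcases pvWsLoop_stop l l.length with h0 | hf
    · omega
    · rw [hgd] at hf; rw [this] at hf; simp at hf
  · rintro ⟨h1, h2⟩
    simp only [PySem.Chars.strIsspace, Bool.and_eq_true, List.all_eq_true]
    constructor
    · simp [List.drop_eq_nil_iff]; omega
    · intro c hc
      rw [List.mem_iff_getElem] at hc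
      obtain ⟨k, hk, hck⟩ := hc
      rw [List.getElem_drop] at hck
      have hkl : i + k < l.length := by simp at hk; omega
      have := pvWsLoop_all l l.length (i + k) (by omega) hkl
      rw [List.getD_eq_getElem l ' ' hkl] at this
      rw [hck] at this
      exact this

-- B's space scan computes A's inner while loop on the suffix
theorem scan_count (l : List Char) (i : Nat) (hi : i ≤ l.length) :
    pvCountSpacesA (l.drop i) = (pvScan l l.length i - i, l.drop (pvScan l l.length i)) ∧
      pvScan l l.length i ≤ l.length := by
  revert hi
  fun_induction pvScan l l.length i with
  | case1 i h ih =>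
    intro hi
    obtain ⟨hilt, hsp⟩ := h
    have ihh := ih (by omega)
    have hge := pvScan_ge l l.length (i + 1)
    have hdrop : l.drop i = l[i] :: l.drop (i + 1) := List.drop_eq_getElem_cons hilt
    have hgd : l.getD i ' ' = l[i] := List.getD_eq_getElem l ' ' hilt
    rw [hgd] at hsp
    rw [hdrop]
    simp only [pvCountSpacesA, hsp, ihh.1]
    rw [if_pos trivial]
    refine ⟨?_, ihh.2⟩
    simp only [Prod.mk.injEq]
    exact ⟨by omega, trivial⟩
  | case2 i h =>
    intro hi
    refine ⟨?_, hi⟩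
    rcases Nat.lt_or_ge i l.length with hilt | hige
    · have hdrop : l.drop i = l[i] :: l.drop (i + 1) := List.drop_eq_getElem_cons hilt
      have hgd : l.getD i ' ' = l[i] := List.getD_eq_getElem l ' ' hilt
      have hne : ¬ l[i] = ' ' := by
        intro hc; exact h ⟨hilt, by rw [hgd, hc]⟩
      rw [hdrop]
      simp only [pvCountSpacesA, if_neg hne]
      simp
    · have : l.drop i = [] := List.drop_eq_nil_of_le hige
      simp [this, pvCountSpacesA]

-- main correspondence: A's outer loop on the suffix = B's indexed loop
theorem loopA_eq_loopB (l : List Char) (i : Nat) (hi : i ≤ l.length) :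
    pvLoopA (l.drop i) = pvLoopB l l.length (pvWsLoop l l.length) i := by
  revert hi
  fun_induction pvLoopB l l.length (pvWsLoop l l.length) i with
  | case1 i hilt op hcond =>
    intro hi
    have hdrop : l.drop i = l[i] :: l.drop (i + 1) := List.drop_eq_getElem_cons hilt
    have hgd : l.getD i ' ' = l[i] := List.getD_eq_getElem l ' ' hilt
    have hsp : PySem.Chars.strIsspace (l.drop (i + 1)) = true :=
      (isspace_drop_iff l (i + 1) (by omega)).mpr ⟨hcond.1, hcond.2⟩
    rw [hdrop, pvLoopA.eq_def]
    simp only [hsp, op, hgd, List.length_drop]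
    rw [if_pos trivial]
    simp only [Prod.mk.injEq, List.cons.injEq, and_true, true_and]
    omega
  | case2 i hilt op hcond j q ih =>
    intro hi
    have hdrop : l.drop i = l[i] :: l.drop (i + 1) := List.drop_eq_getElem_cons hilt
    have hgd : l.getD i ' ' = l[i] := List.getD_eq_getElem l ' ' hilt
    have hsp : ¬ PySem.Chars.strIsspace (l.drop (i + 1)) = true := by
      rw [isspace_drop_iff l (i + 1) (by omega)]; exact hcond
    obtain ⟨hcount, hjle⟩ := scan_count l (i + 1) (by omega)
    have hge := pvScan_ge l l.length (i + 1)
    rw [hdrop, pvLoopA.eq_def]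
    simp only [if_neg hsp, hcount]
    rw [ih hjle]
    simp only [op, hgd, q, j, Prod.mk.injEq]
    refine ⟨trivial, ?_⟩
    simp only [List.cons.injEq, and_true]
    omega
  | case3 i hge =>
    intro hi
    have : i = l.length := by omega
    subst this
    rw [List.drop_length, pvLoopA.eq_def]

theorem ports_agree (s : String) :
    operator_line_to_operators_and_widths s = operator_line_to_operators_and_widths_alt s := by
  unfold operator_line_to_operators_and_widths operator_line_to_operators_and_widths_alt
  simpa using loopA_eq_loopB s.toList 0 (by omega)

-- ===== VERDICT (by name: the statement is the Claim_ definition above) =====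
theorem operator_line_to_operators_and_widths_spec : Claim_equal_operator_line_to_operators_and_widths := by
  intro s _
  unfold Spec_operator_line_to_operators_and_widths
  exact ports_agree s
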